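-- pv_equiv track=rewrite | github.com/HaykTyan2/wikipedia-topic-explorer | src/utils.py | is_valid_article
-- ===== SOURCE A (Python) =====
-- def is_valid_article(href: str) -> bool:
--
--     if not href.startswith("/wiki/"):
--         return False
--
--     # Exclude Main Page and special namespaces like File:, Help:, Category:
--     invalid_prefixes = [
--         "/wiki/Main_Page",
--         "/wiki/File:",
--         "/wiki/Help:",
--         "/wiki/Category:",
--         "/wiki/Special:",
--         "/wiki/Talk:",
--         "/wiki/Portal:",
--         "/wiki/Template:",
--     ]
--     #so here we're basically utilizing "any" with the generator so that if the generator for the first time meets a "true" then we immediately return true.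
--     return not any(href.startswith(prefix) for prefix in invalid_prefixes)
-- ===== SOURCE B (Python) =====
-- NAMESPACES = {"File", "Help", "Category", "Special", "Talk", "Portal", "Template"}
--
--
-- def is_valid_article(href: str) -> bool:
--     if not href.startswith("/wiki/"):
--         return False
--     rest = href[6:]
--     if rest.startswith("Main_Page"):
--         return False
--     i = rest.find(":")
--     return i == -1 or rest[:i] not in NAMESPACES
-- ===== Notes on version B (the rewrite author's own statement) =====
-- stated objective: idiomatic
-- what changed: Instead of scanning a list of eight full URL prefixes with repeated startswith calls, B strips the six-character wiki prefix once, locates the first colon, and checks the namespace token before it against a set in one lookup.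
import Mathlib
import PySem

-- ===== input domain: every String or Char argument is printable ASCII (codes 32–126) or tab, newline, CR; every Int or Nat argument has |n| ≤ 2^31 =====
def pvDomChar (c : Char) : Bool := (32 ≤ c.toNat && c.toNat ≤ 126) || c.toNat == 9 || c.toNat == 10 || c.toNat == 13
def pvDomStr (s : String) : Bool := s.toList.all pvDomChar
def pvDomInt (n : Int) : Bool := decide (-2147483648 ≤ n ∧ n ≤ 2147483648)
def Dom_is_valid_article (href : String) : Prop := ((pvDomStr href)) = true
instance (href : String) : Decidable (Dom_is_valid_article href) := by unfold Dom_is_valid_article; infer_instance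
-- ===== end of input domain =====

-- B replaces A's scan over eight full URL prefixes by stripping '/wiki/' once and
-- checking the token before the first colon against a namespace set (idiomatic).

-- ===== PORT A =====
def is_valid_article (href : String) : Bool :=
  if !(PySem.Str.startswith href "/wiki/") then false
  else
    let invalid_prefixes : List String :=
      ["/wiki/Main_Page", "/wiki/File:", "/wiki/Help:", "/wiki/Category:",
       "/wiki/Special:", "/wiki/Talk:", "/wiki/Portal:", "/wiki/Template:"]
    !(invalid_prefixes.any (fun p => PySem.Str.startswith href p))

-- ===== PORT B =====
def pvNamespaces : PySem.Set String :=
  PySem.Set.ofList ["File", "Help", "Category", "Special", "Talk", "Portal", "Template"]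

def is_valid_article_alt (href : String) : Bool :=
  if !(PySem.Str.startswith href "/wiki/") then false
  else
    let rest := PySem.Str.slice href (some 6) none
    if PySem.Str.startswith rest "Main_Page" then false
    else
      let i := PySem.Str.find rest ":"
      (i == -1) || !(pvNamespaces.contains (PySem.Str.slice rest none (some i)))

-- ===== PRECONDITION & SPEC =====
def Spec_is_valid_article (href : String) (out : Bool) : Prop := out = is_valid_article_alt href
instance (href : String) (out : Bool) : Decidable (Spec_is_valid_article href out) := by unfold Spec_is_valid_article; infer_instance

-- ===== CLAIM (what is proved, stated in full; the proofs are below) =====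
def Claim_equal_is_valid_article : Prop := ∀ (href : String), Dom_is_valid_article href → Spec_is_valid_article href (is_valid_article href)

-- ===== LEMMAS AND PROOFS =====

-- find.go with a single-character pattern is first-occurrence search
lemma pv_find_go_singleton (c : Char) (cs : List Char) : ∀ (k : Nat),
    PySem.Chars.find.go [c] cs k = if c ∈ cs then ((k + cs.idxOf c : Nat) : Int) else -1 := by
  induction cs with
  | nil => intro k; simp [PySem.Chars.find.go]
  | cons a t ih =>
    intro k
    by_cases hac : a = c
    · subst hac
      simp [PySem.Chars.find.go, List.isPrefixOf]
    · have hca : ¬ c = a := fun hh => hac hh.symm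
      have h1 : ([c].isPrefixOf (a :: t)) = false := by
        simp only [List.isPrefixOf, Bool.and_eq_false_iff]
        left; simpa using hca
      rw [PySem.Chars.find.go]
      simp only [h1, Bool.false_eq_true, if_false, ih (k + 1)]
      rw [List.idxOf_cons_ne t hac]
      by_cases hm : c ∈ t
      · simp only [List.mem_cons, hm, or_true, if_true]
        push_cast; ring
      · have hmem : ¬ (c ∈ a :: t) := by
          simp only [List.mem_cons, not_or]; exact ⟨hca, hm⟩
        simp [hm, hmem]

lemma pv_find_singleton (cs : List Char) (c : Char) :
    PySem.Chars.find cs [c] = if c ∈ cs then ((cs.idxOf c : Nat) : Int) else -1 := by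
  simpa using pv_find_go_singleton c cs 0

lemma pv_idxOf_append_cons (t s : List Char) (c : Char) (hc : c ∉ t) :
    (t ++ c :: s).idxOf c = t.length := by
  induction t with
  | nil => simp
  | cons a t ih =>
    simp only [List.mem_cons, not_or] at hc
    rw [List.cons_append, List.idxOf_cons_ne _ (fun h => hc.1 h.symm)]
    simp [ih hc.2]

-- '<token>:' is a prefix of cs iff cs contains ':' and the part before the first ':' is <token>
lemma pv_token_colon_prefix_iff (t cs : List Char) (hc : ':' ∉ t) :
    (t ++ [':']) <+: cs ↔ ':' ∈ cs ∧ cs.take (cs.idxOf ':') = t := by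
  constructor
  · rintro ⟨s, hs⟩
    have hcs : cs = t ++ ':' :: s := by rw [← hs]; simp
    subst hcs
    refine ⟨by simp, ?_⟩
    rw [pv_idxOf_append_cons t s ':' hc]
    exact List.take_left
  · rintro ⟨hmem, htake⟩
    have hlt : cs.idxOf ':' < cs.length := List.idxOf_lt_length_iff.mpr hmem
    refine ⟨cs.drop (cs.idxOf ':' + 1), ?_⟩
    conv_rhs => rw [← List.take_append_drop (cs.idxOf ':') cs]
    rw [List.drop_eq_getElem_cons hlt, List.getElem_idxOf hlt, htake]
    simp


-- namespace-set membership, phrased on char lists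
def pvNSL : List (List Char) :=
  ["File".toList, "Help".toList, "Category".toList, "Special".toList,
   "Talk".toList, "Portal".toList, "Template".toList]

lemma pv_mem_NS (s : String) : (s ∈ pvNamespaces) ↔ s.toList ∈ pvNSL := by
  simp [pvNamespaces, PySem.Set.ofList, PySem.Set.add, PySem.Set.empty, pvNSL, ← String.toList_inj]

lemma pv_contains_false (s : String) :
    (PySem.Set.contains pvNamespaces s = false) ↔ ¬ (s.toList ∈ pvNSL) := by
  rw [Bool.eq_false_iff, ne_eq]
  exact not_congr ((by simp [PySem.Set.contains] : PySem.Set.contains pvNamespaces s = true ↔ s ∈ pvNamespaces).trans (pv_mem_NS s))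

-- the propositional core: A's seven namespace-prefix disjuncts are B's first-colon parse
set_option maxHeartbeats 1000000 in
lemma pv_core (rest : List Char) :
    (("File".toList ++ [':']) <+: rest ∨ ("Help".toList ++ [':']) <+: rest ∨
     ("Category".toList ++ [':']) <+: rest ∨ ("Special".toList ++ [':']) <+: rest ∨
     ("Talk".toList ++ [':']) <+: rest ∨ ("Portal".toList ++ [':']) <+: rest ∨
     ("Template".toList ++ [':']) <+: rest) ↔
    (':' ∈ rest ∧ rest.take (rest.idxOf ':') ∈ pvNSL) := by
  rw [pv_token_colon_prefix_iff "File".toList rest (by decide),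
    pv_token_colon_prefix_iff "Help".toList rest (by decide),
    pv_token_colon_prefix_iff "Category".toList rest (by decide),
    pv_token_colon_prefix_iff "Special".toList rest (by decide),
    pv_token_colon_prefix_iff "Talk".toList rest (by decide),
    pv_token_colon_prefix_iff "Portal".toList rest (by decide),
    pv_token_colon_prefix_iff "Template".toList rest (by decide)]
  simp only [pvNSL, List.mem_cons, List.not_mem_nil, or_false]
  constructor
  · rintro (⟨hm, ht⟩ | ⟨hm, ht⟩ | ⟨hm, ht⟩ | ⟨hm, ht⟩ | ⟨hm, ht⟩ | ⟨hm, ht⟩ | ⟨hm, ht⟩)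
    exacts [⟨hm, Or.inl ht⟩, ⟨hm, Or.inr (Or.inl ht)⟩, ⟨hm, Or.inr (Or.inr (Or.inl ht))⟩,
      ⟨hm, Or.inr (Or.inr (Or.inr (Or.inl ht)))⟩,
      ⟨hm, Or.inr (Or.inr (Or.inr (Or.inr (Or.inl ht))))⟩,
      ⟨hm, Or.inr (Or.inr (Or.inr (Or.inr (Or.inr (Or.inl ht)))))⟩,
      ⟨hm, Or.inr (Or.inr (Or.inr (Or.inr (Or.inr (Or.inr ht)))))⟩]
  · rintro ⟨hm, ht | ht | ht | ht | ht | ht | ht⟩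
    exacts [Or.inl ⟨hm, ht⟩, Or.inr (Or.inl ⟨hm, ht⟩), Or.inr (Or.inr (Or.inl ⟨hm, ht⟩)),
      Or.inr (Or.inr (Or.inr (Or.inl ⟨hm, ht⟩))),
      Or.inr (Or.inr (Or.inr (Or.inr (Or.inl ⟨hm, ht⟩)))),
      Or.inr (Or.inr (Or.inr (Or.inr (Or.inr (Or.inl ⟨hm, ht⟩))))),
      Or.inr (Or.inr (Or.inr (Or.inr (Or.inr (Or.inr ⟨hm, ht⟩)))))]

set_option maxHeartbeats 1000000 in
lemma pv_main_eq (href : String) : is_valid_article href = is_valid_article_alt href := by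
  unfold is_valid_article is_valid_article_alt
  by_cases h : PySem.Str.startswith href "/wiki/" = true
  · simp only [h, Bool.not_true, Bool.false_eq_true, if_false]
    have h' := h
    rw [PySem.Str.startswith_eq] at h'
    obtain ⟨rest, hrest⟩ := (PySem.Chars.startswith_iff _ _).mp h'
    have hrl : (PySem.Str.slice href (some 6) none).toList = rest := by
      rw [PySem.Str.toList_slice, PySem.Chars.slice_eq_listSlice,
        show ((6 : Int)) = ((6 : Nat) : Int) from rfl, PySem.List.slice_from_natCast,
        ← hrest]
      rfl
    have hsw : ∀ (p q : String), p.toList = "/wiki/".toList ++ q.toList →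
        (PySem.Str.startswith href p = true ↔ q.toList <+: rest) := by
      intro p q hpq
      rw [PySem.Str.startswith_eq, PySem.Chars.startswith_iff, ← hrest, hpq,
        List.prefix_append_right_inj]
    have fMP : PySem.Str.startswith href "/wiki/Main_Page" = false ↔
        ¬ ("Main_Page".toList <+: rest) := by
      rw [Bool.eq_false_iff, ne_eq, hsw "/wiki/Main_Page" "Main_Page" (by decide)]
    have fF : PySem.Str.startswith href "/wiki/File:" = false ↔
        ¬ (("File".toList ++ [':']) <+: rest) := by
      rw [Bool.eq_false_iff, ne_eq, hsw "/wiki/File:" "File:" (by decide),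
        show ("File:".toList) = "File".toList ++ [':'] by decide]
    have fH : PySem.Str.startswith href "/wiki/Help:" = false ↔
        ¬ (("Help".toList ++ [':']) <+: rest) := by
      rw [Bool.eq_false_iff, ne_eq, hsw "/wiki/Help:" "Help:" (by decide),
        show ("Help:".toList) = "Help".toList ++ [':'] by decide]
    have fC : PySem.Str.startswith href "/wiki/Category:" = false ↔
        ¬ (("Category".toList ++ [':']) <+: rest) := by
      rw [Bool.eq_false_iff, ne_eq, hsw "/wiki/Category:" "Category:" (by decide),
        show ("Category:".toList) = "Category".toList ++ [':'] by decide]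
    have fS : PySem.Str.startswith href "/wiki/Special:" = false ↔
        ¬ (("Special".toList ++ [':']) <+: rest) := by
      rw [Bool.eq_false_iff, ne_eq, hsw "/wiki/Special:" "Special:" (by decide),
        show ("Special:".toList) = "Special".toList ++ [':'] by decide]
    have fT : PySem.Str.startswith href "/wiki/Talk:" = false ↔
        ¬ (("Talk".toList ++ [':']) <+: rest) := by
      rw [Bool.eq_false_iff, ne_eq, hsw "/wiki/Talk:" "Talk:" (by decide),
        show ("Talk:".toList) = "Talk".toList ++ [':'] by decide]
    have fP : PySem.Str.startswith href "/wiki/Portal:" = false ↔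
        ¬ (("Portal".toList ++ [':']) <+: rest) := by
      rw [Bool.eq_false_iff, ne_eq, hsw "/wiki/Portal:" "Portal:" (by decide),
        show ("Portal:".toList) = "Portal".toList ++ [':'] by decide]
    have fTm : PySem.Str.startswith href "/wiki/Template:" = false ↔
        ¬ (("Template".toList ++ [':']) <+: rest) := by
      rw [Bool.eq_false_iff, ne_eq, hsw "/wiki/Template:" "Template:" (by decide),
        show ("Template:".toList) = "Template".toList ++ [':'] by decide]
    have hfind : PySem.Str.find (PySem.Str.slice href (some 6) none) ":" =
        if ':' ∈ rest then ((rest.idxOf ':' : Nat) : Int) else -1 := by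
      rw [PySem.Str.find_eq, hrl, show (":".toList) = [':'] by decide]
      exact pv_find_singleton rest ':'
    by_cases hMP : "Main_Page".toList <+: rest
    · have e0 : PySem.Str.startswith href "/wiki/Main_Page" = true :=
        (hsw "/wiki/Main_Page" "Main_Page" (by decide)).mpr hMP
      have eB : PySem.Str.startswith (PySem.Str.slice href (some 6) none) "Main_Page" = true := by
        rw [PySem.Str.startswith_eq, hrl, PySem.Chars.startswith_iff]; exact hMP
      rw [if_pos eB]
      simp only [List.any_cons, e0, Bool.true_or, Bool.not_true]
    · have eBn : ¬ (PySem.Str.startswith (PySem.Str.slice href (some 6) none) "Main_Page" = true) := by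
        intro hh
        rw [PySem.Str.startswith_eq, hrl, PySem.Chars.startswith_iff] at hh
        exact hMP hh
      rw [if_neg eBn]
      by_cases hcol : ':' ∈ rest
      · have hfi : PySem.Str.find (PySem.Str.slice href (some 6) none) ":" =
            ((rest.idxOf ':' : Nat) : Int) := by rw [hfind, if_pos hcol]
        have hsl_eq : (PySem.Str.slice (PySem.Str.slice href (some 6) none) none
            (some ((rest.idxOf ':' : Nat) : Int))).toList = rest.take (rest.idxOf ':') := by
          rw [PySem.Str.toList_slice, PySem.Chars.slice_eq_listSlice, hrl,
            PySem.List.slice_to rest (by omega)]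
          simp
        have cmem : (PySem.Set.contains pvNamespaces (PySem.Str.slice
            (PySem.Str.slice href (some 6) none) none
            (some ((rest.idxOf ':' : Nat) : Int))) = false) ↔
            ¬ (rest.take (rest.idxOf ':') ∈ pvNSL) :=
          (pv_contains_false _).trans (by rw [hsl_eq])
        rw [hfi, Bool.eq_iff_iff]
        simp only [List.any_cons, List.any_nil, Bool.or_false, Bool.not_eq_true',
          Bool.or_eq_false_iff, Bool.or_eq_true, beq_iff_eq, fMP, fF, fH, fC, fS, fT, fP, fTm, cmem]
        rw [show ((¬ ("File".toList ++ [':']) <+: rest) ∧ (¬ ("Help".toList ++ [':']) <+: rest) ∧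
            (¬ ("Category".toList ++ [':']) <+: rest) ∧ (¬ ("Special".toList ++ [':']) <+: rest) ∧
            (¬ ("Talk".toList ++ [':']) <+: rest) ∧ (¬ ("Portal".toList ++ [':']) <+: rest) ∧
            (¬ ("Template".toList ++ [':']) <+: rest)) ↔
            ¬ (rest.take (rest.idxOf ':') ∈ pvNSL) from ?_ ]
        · constructor
          · intro hh; exact Or.inr hh.2
          · rintro (hh | hh)
            · exact absurd hh (by omega)
            · exact ⟨hMP, hh⟩
        · rw [show (¬ (rest.take (rest.idxOf ':') ∈ pvNSL)) ↔
              ¬ (':' ∈ rest ∧ rest.take (rest.idxOf ':') ∈ pvNSL) from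
              ⟨fun hh hc => hh hc.2, fun hh hm => hh ⟨hcol, hm⟩⟩, ← pv_core rest]
          constructor
          · rintro ⟨h1, h2, h3, h4, h5, h6, h7⟩ (hx | hx | hx | hx | hx | hx | hx)
            exacts [h1 hx, h2 hx, h3 hx, h4 hx, h5 hx, h6 hx, h7 hx]
          · intro hh
            exact ⟨fun hx => hh (Or.inl hx), fun hx => hh (Or.inr (Or.inl hx)),
              fun hx => hh (Or.inr (Or.inr (Or.inl hx))),
              fun hx => hh (Or.inr (Or.inr (Or.inr (Or.inl hx)))),
              fun hx => hh (Or.inr (Or.inr (Or.inr (Or.inr (Or.inl hx))))),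
              fun hx => hh (Or.inr (Or.inr (Or.inr (Or.inr (Or.inr (Or.inl hx)))))),
              fun hx => hh (Or.inr (Or.inr (Or.inr (Or.inr (Or.inr (Or.inr hx))))))⟩
      · have hfi : PySem.Str.find (PySem.Str.slice href (some 6) none) ":" = (-1 : Int) := by
          rw [hfind, if_neg hcol]
        rw [hfi, Bool.eq_iff_iff]
        simp only [List.any_cons, List.any_nil, Bool.or_false, Bool.not_eq_true',
          Bool.or_eq_false_iff, Bool.or_eq_true, beq_iff_eq, fMP, fF, fH, fC, fS, fT, fP, fTm]
        constructor
        · intro _; exact Or.inl trivial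
        · intro _
          have hnc : ∀ (t : List Char), (t ++ [':']) <+: rest → False := by
            intro t ht
            rcases ht with ⟨s, hs⟩
            exact hcol (by rw [← hs]; simp)
          exact ⟨hMP, hnc _, hnc _, hnc _, hnc _, hnc _, hnc _, hnc _⟩
  · have hb : PySem.Str.startswith href "/wiki/" = false := Bool.eq_false_iff.mpr h
    rw [hb]
    simp
-- ===== VERDICT (by name: the statement is the Claim_ definition above) =====
theorem is_valid_article_spec : Claim_equal_is_valid_article := by
  intro href _
  unfold Spec_is_valid_article
  exact pv_main_eq href
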